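-- pv_equiv track=rewrite | github.com/aelgazar123/Final_For_DevOps | pavr.py | prepare_input
-- ===== SOURCE A (Python) =====
-- import string
--
-- def prepare_input(text):
--     text = "".join([c.upper() for c in text if c in string.ascii_letters])
--     clean = ""
--
--     if len(text) < 2:
--         return text
--
--     for i in range(len(text) - 1):
--         clean += text[i]
--
--         if text[i] == text[i + 1]:
--             clean += "X"
--
--     clean += text[-1]
--
--     if len(clean) & 1:
--         clean += "X"
--
--     return clean
-- ===== SOURCE B (Python) =====
-- import string
--
-- def prepare_input(text):
--     text = "".join(c.upper() for c in text if c in string.ascii_letters)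
--     if len(text) < 2:
--         return text
--     parts = []
--     i = 0
--     n = len(text)
--     while i < n:
--         j = i
--         while j < n and text[j] == text[i]:
--             j += 1
--         parts.append("X".join(text[i:j]))
--         i = j
--     res = "".join(parts)
--     if len(res) % 2:
--         res += "X"
--     return res
-- ===== Notes on version B (the rewrite author's own statement) =====
-- stated objective: alternative
-- what changed: replaced the pairwise index scan (compare text[i] with text[i+1] for every i) by a run-length decomposition: split the filtered text into maximal runs of equal characters and expand each run of length k to its k characters with k-1 X separators, then pad
import Mathlib
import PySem

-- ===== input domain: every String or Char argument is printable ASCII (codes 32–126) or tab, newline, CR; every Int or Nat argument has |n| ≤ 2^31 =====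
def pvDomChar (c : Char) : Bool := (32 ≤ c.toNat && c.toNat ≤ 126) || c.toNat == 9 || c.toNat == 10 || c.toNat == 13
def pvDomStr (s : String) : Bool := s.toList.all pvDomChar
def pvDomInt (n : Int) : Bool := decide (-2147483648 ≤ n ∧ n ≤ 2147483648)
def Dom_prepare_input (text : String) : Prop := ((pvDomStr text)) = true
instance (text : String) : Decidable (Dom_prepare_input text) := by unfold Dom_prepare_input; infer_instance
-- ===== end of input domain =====

-- B replaces A's pairwise index scan by a run-length decomposition of the filtered text; same cost, different structure.

-- shared first line of both Pythons: "".join(c.upper() for c in text if c in string.ascii_letters)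
def pvLetterUpper (cs : List Char) : List Char :=
  (cs.filter (fun c => ('A' ≤ c && c ≤ 'Z') || ('a' ≤ c && c ≤ 'z'))).map Char.toUpper

-- ===== PORT A =====
def prepare_input (text : String) : String :=
  let t := pvLetterUpper text.toList
  if t.length < 2 then String.ofList t
  else
    let clean := (PySem.List.pyRange 0 (PySem.List.len t - 1) 1).foldl
      (fun acc i =>
        let acc := acc ++ [PySem.List.pyGetD t i ' ']
        if PySem.List.pyGetD t i ' ' = PySem.List.pyGetD t (i + 1) ' ' then acc ++ ['X'] else acc)
      []
    let clean := clean ++ [PySem.List.pyGetD t (-1) ' ']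
    let clean := if PySem.Int.band (PySem.List.len clean) 1 ≠ 0 then clean ++ ['X'] else clean
    String.ofList clean

-- ===== PORT B =====
-- "X".join of a run of k+1 copies of c
def pvJoinX (c : Char) : Nat → List Char
  | 0 => []
  | k + 1 => c :: (List.replicate k ['X', c]).flatten

-- the outer while loop of Source B: peel off the maximal run at the front (char, length)
def pvRuns : List Char → List (Char × Nat)
  | [] => []
  | a :: r => (a, (r.takeWhile (· == a)).length + 1) :: pvRuns (r.dropWhile (· == a))
termination_by t => t.length
decreasing_by
  have := List.length_dropWhile_le (· == a) r
  simp only [List.length_cons]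
  omega

def prepare_input_alt (text : String) : String :=
  let t := pvLetterUpper text.toList
  if t.length < 2 then String.ofList t
  else
    let res := (pvRuns t).flatMap (fun p => pvJoinX p.1 p.2)
    let res := if PySem.Int.mod (PySem.List.len res) 2 ≠ 0 then res ++ ['X'] else res
    String.ofList res

-- ===== PRECONDITION & SPEC =====
def Spec_prepare_input (text : String) (out : String) : Prop := out = prepare_input_alt text
instance (text : String) (out : String) : Decidable (Spec_prepare_input text out) := by unfold Spec_prepare_input; infer_instance

-- ===== CLAIM (what is proved, stated in full; the proofs are below) =====
def Claim_equal_prepare_input : Prop := ∀ (text : String), Dom_prepare_input text → Spec_prepare_input text (prepare_input text)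

-- ===== LEMMAS AND PROOFS =====

-- the common normal form: A's pairwise scan, written structurally
def pvPairs : List Char → List Char
  | [] => []
  | [a] => [a]
  | a :: b :: r => a :: ((if a = b then ['X'] else []) ++ pvPairs (b :: r))

-- what A's loop body contributes at index i
def pvG (t : List Char) (i : Nat) : List Char :=
  t.getD i ' ' :: (if t.getD i ' ' = t.getD (i + 1) ' ' then ['X'] else [])

lemma pvJoinX_succ_succ (c : Char) (k : Nat) :
    pvJoinX c (k + 2) = c :: 'X' :: pvJoinX c (k + 1) := by
  simp [pvJoinX, List.replicate_succ]

lemma pvPairs_replicate (a : Char) (k : Nat) (rest : List Char)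
    (h : ∀ c, rest.head? = some c → c ≠ a) :
    pvPairs (List.replicate (k + 1) a ++ rest) = pvJoinX a (k + 1) ++ pvPairs rest := by
  induction k with
  | zero =>
      cases rest with
      | nil => simp [pvPairs, pvJoinX]
      | cons c cs =>
          have hca : ¬ a = c := fun e => (h c rfl) e.symm
          simp [pvPairs, pvJoinX, hca]
  | succ k ih =>
      have : List.replicate (k + 2) a ++ rest = a :: a :: (List.replicate k a ++ rest) := by
        simp [List.replicate_succ]
      rw [this, pvJoinX_succ_succ]
      have ih' := ih
      rw [List.replicate_succ] at ih'
      simp only [List.cons_append] at ih' ⊢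
      simp [pvPairs, ih']

lemma pvRuns_flat (t : List Char) :
    (pvRuns t).flatMap (fun p => pvJoinX p.1 p.2) = pvPairs t := by
  induction t using pvRuns.induct with
  | case1 => simp [pvRuns, pvPairs]
  | case2 a r ih =>
      rw [pvRuns]
      have hsplit : a :: r = List.replicate ((r.takeWhile (· == a)).length + 1) a
          ++ r.dropWhile (· == a) := by
        conv_lhs => rw [← List.takeWhile_append_dropWhile (p := (· == a)) (l := r)]
        have : r.takeWhile (· == a) = List.replicate (r.takeWhile (· == a)).length a := by
          apply List.eq_replicate_of_mem
          intro c hc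
          have := List.mem_takeWhile_imp hc
          simpa using this.symm
        rw [List.replicate_succ]
        conv_lhs => rw [this]
        simp
      have hhead : ∀ c, (r.dropWhile (· == a)).head? = some c → c ≠ a := by
        intro c hc e
        have := List.head?_dropWhile_not (· == a) r
        rw [hc] at this
        simp [e] at this
      conv_lhs => rw [List.flatMap_cons]
      rw [ih]
      conv_rhs => rw [hsplit]
      rw [pvPairs_replicate a _ _ hhead]

lemma pvPairs_flat_range (a : Char) (r : List Char) :
    (List.range ((a :: r).length - 1)).flatMap (pvG (a :: r))
      ++ [(a :: r).getLast (by simp)] = pvPairs (a :: r) := by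
  induction r generalizing a with
  | nil => simp [pvPairs]
  | cons b r ih =>
      have hlen : (a :: b :: r).length - 1 = (b :: r).length := by simp
      rw [hlen, List.length_cons, List.range_succ_eq_map, List.flatMap_cons, List.flatMap_map]
      have hfun : (fun i => pvG (a :: b :: r) (i + 1)) = pvG (b :: r) := by
        funext i
        simp [pvG]
      rw [hfun]
      simp only [List.length_cons, Nat.add_sub_cancel] at ih
      have hlast : (a :: b :: r).getLast (by simp) = (b :: r).getLast (by simp) := by
        simp [List.getLast_cons]
      rw [hlast, List.append_assoc, ih b]
      have hg0 : pvG (a :: b :: r) 0 = a :: (if a = b then ['X'] else []) := by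
        simp [pvG]
      rw [hg0]
      simp [pvPairs]

lemma pvFoldl_eq_pvPairs (a : Char) (r : List Char) :
    ((PySem.List.pyRange 0 (PySem.List.len (a :: r) - 1) 1).foldl
      (fun acc i =>
        let acc := acc ++ [PySem.List.pyGetD (a :: r) i ' ']
        if PySem.List.pyGetD (a :: r) i ' ' = PySem.List.pyGetD (a :: r) (i + 1) ' '
          then acc ++ ['X'] else acc)
      [])
      ++ [PySem.List.pyGetD (a :: r) (-1) ' '] = pvPairs (a :: r) := by
  have hne : (a :: r) ≠ [] := by simp
  rw [show PySem.List.pyGetD (a :: r) (-1) ' ' = (a :: r).getLast hne from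
    PySem.List.pyGetD_neg_one (a :: r) ' ' hne]
  rw [← pvPairs_flat_range a r]
  congr 1
  rw [PySem.List.len_eq, PySem.List.pyRange_one]
  have htoNat : (((a :: r).length : Int) - 1 - 0).toNat = (a :: r).length - 1 := by omega
  rw [htoNat, List.foldl_map]
  have hstep : ∀ (acc : List Char) (k : Nat), k ∈ List.range ((a :: r).length - 1) →
      (let acc' := acc ++ [PySem.List.pyGetD (a :: r) ((0 : Int) + (k : Int)) ' '];
       if PySem.List.pyGetD (a :: r) ((0 : Int) + (k : Int)) ' '
          = PySem.List.pyGetD (a :: r) ((0 : Int) + (k : Int) + 1) ' '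
        then acc' ++ ['X'] else acc') = acc ++ pvG (a :: r) k := by
    intro acc k _
    have h1 : ((0 : Int) + (k : Int)) = ((k : Nat) : Int) := by omega
    have h2 : ((0 : Int) + (k : Int) + 1) = (((k + 1 : Nat)) : Int) := by push_cast; omega
    rw [h2, h1]
    simp only [PySem.List.pyGetD_natCast, pvG]
    split <;> simp [List.append_assoc]
  rw [PySem.List.foldl_congr_mem _ _ (fun acc k => acc ++ pvG (a :: r) k) _ hstep,
    PySem.List.foldl_append_eq_flatMap]
  simp

-- ===== VERDICT (by name: the statement is the Claim_ definition above) =====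
theorem prepare_input_spec : Claim_equal_prepare_input := by
  intro text _
  unfold Spec_prepare_input prepare_input prepare_input_alt
  set t := pvLetterUpper text.toList with ht
  by_cases hl : t.length < 2
  · simp [hl]
  · simp only [hl, if_false]
    have htne : t ≠ [] := by
      intro h
      rw [h] at hl
      simp at hl
    obtain ⟨a, r, hcons⟩ := List.exists_cons_of_ne_nil htne
    have hcore : ((PySem.List.pyRange 0 (PySem.List.len t - 1) 1).foldl
        (fun acc i =>
          let acc := acc ++ [PySem.List.pyGetD t i ' ']
          if PySem.List.pyGetD t i ' ' = PySem.List.pyGetD t (i + 1) ' '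
            then acc ++ ['X'] else acc) [])
        ++ [PySem.List.pyGetD t (-1) ' ']
        = (pvRuns t).flatMap (fun p => pvJoinX p.1 p.2) := by
      rw [pvRuns_flat, hcons]
      exact pvFoldl_eq_pvPairs a r
    simp only [← hcore]
    congr 1
    rw [PySem.Int.band_one]
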